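-- pv_equiv track=rewrite | github.com/casruta/PDF-Indexer- | src/pdf_indexer/export.py | _dominant_column_type
-- ===== SOURCE A (Python) =====
-- from collections import Counter
--
-- def _dominant_column_type(col_idx: int, rows: list[list[dict]]) -> str:
--     """Return the most common data_type for a column, or 'text'."""
--     types: list[str] = []
--     for row in rows:
--         if col_idx < len(row) and row[col_idx]["value"].strip():
--             types.append(row[col_idx]["data_type"])
--     if not types:
--         return "text"
--     counter = Counter(types)
--     most_common, _ = counter.most_common(1)[0]
--     return most_common
-- ===== SOURCE B (Python) =====
-- def _dominant_column_type(col_idx: int, rows: list) -> str: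
--     """Return the most common data_type for a column, or 'text'."""
--     types = [row[col_idx]["data_type"] for row in rows
--              if col_idx < len(row) and row[col_idx]["value"].strip()]
--
--     def mode(ts):
--         # recursive selection: count the first type, delete all its occurrences,
--         # recurse on the rest; the earlier candidate wins ties (>=)
--         if not ts:
--             return ("text", 0)
--         head = ts[0]
--         c = ts.count(head)
--         rest = mode([x for x in ts if x != head])
--         return (head, c) if c >= rest[1] else rest
--
--     return mode(types)[0]
-- ===== Notes on version B (the rewrite author's own statement) =====
-- stated objective: alternative
-- what changed: B drops Counter/most_common entirely: it selects the mode by recursion on the distinct types - count the first type's occurrences with list.count, delete all of them, recurse on the remainder, and keep the earlier candidate on ties (>=) - trading the hash counter for repeated counting and deletion.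
import Mathlib
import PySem

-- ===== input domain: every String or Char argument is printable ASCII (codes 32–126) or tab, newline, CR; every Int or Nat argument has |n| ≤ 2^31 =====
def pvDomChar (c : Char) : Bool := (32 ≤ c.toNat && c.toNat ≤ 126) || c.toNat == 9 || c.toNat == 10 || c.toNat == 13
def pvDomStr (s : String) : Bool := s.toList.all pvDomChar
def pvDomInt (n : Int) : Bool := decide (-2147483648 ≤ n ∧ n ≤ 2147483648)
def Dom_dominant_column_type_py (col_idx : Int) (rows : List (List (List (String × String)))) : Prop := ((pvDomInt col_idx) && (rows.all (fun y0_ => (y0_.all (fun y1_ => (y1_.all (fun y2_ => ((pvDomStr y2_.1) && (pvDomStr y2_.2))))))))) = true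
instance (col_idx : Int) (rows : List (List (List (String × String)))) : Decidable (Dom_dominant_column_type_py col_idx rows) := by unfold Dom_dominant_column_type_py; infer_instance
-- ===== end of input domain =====

-- B replaces Counter + most_common(1) by a recursive mode selection over the qualifying
-- types: count the first type, delete all its occurrences, recurse, earlier wins ties
-- (objective: alternative). Proved equal on Pre_ (inputs where the Python does not raise).

-- ===== PORT A =====
-- shared cell helpers: the dict at row[col_idx] (total form, valid under Pre_) and the cell test
def pvCell (col_idx : Int) (row : List (List (String × String))) : PySem.Dict String String :=
  PySem.Dict.mk (PySem.List.pyGetD row col_idx [])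

def pvQual (col_idx : Int) (row : List (List (String × String))) : Bool :=
  decide (col_idx < PySem.List.len row) &&
    !(PySem.Str.strip ((pvCell col_idx row).getD "value" "") == "")

def dominant_column_type_py (col_idx : Int) (rows : List (List (List (String × String)))) : String :=
  let types : List String := rows.foldl
    (fun acc row =>
      if pvQual col_idx row then acc ++ [(pvCell col_idx row).getD "data_type" ""] else acc) []
  if types = [] then "text"
  else
    -- counter.most_common(1)[0]: stable sort of counter items by count, descending, take 1, index 0
    match (PySem.List.sorted (PySem.Dict.counter types).items (fun p => p.2) true).take 1 with
    | (mc, _) :: _ => mc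
    | [] => "text"   -- unreachable (types ≠ []): the [0] IndexError site

-- ===== PORT B =====
-- Source B's inner 'mode': recursion deleting every occurrence of the first element
def pvBMode : List String → String × Int
  | [] => ("text", 0)
  | h :: t =>
    let c : Int := (PySem.List.count (h :: t) h : Int)
    let rest := pvBMode ((h :: t).filter (fun x => !(x == h)))
    if c ≥ rest.2 then (h, c) else rest
termination_by ts => ts.length
decreasing_by
  simp only [List.filter_cons, beq_self_eq_true, Bool.not_true, List.length_cons]
  exact Nat.lt_succ_of_le (List.length_filter_le _ _)

def dominant_column_type_py_alt (col_idx : Int) (rows : List (List (List (String × String)))) : String :=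
  let types : List String :=
    (rows.filter (pvQual col_idx)).map (fun row => (pvCell col_idx row).getD "data_type" "")
  (pvBMode types).1

-- ===== PRECONDITION & SPEC =====
-- Pre_ excludes exactly the inputs where the Python raises: a row with col_idx < len(row) whose
-- row[col_idx] is out of range (IndexError for negative col_idx), or whose cell dict lacks the
-- "value" key, or lacks the "data_type" key when the stripped value is non-empty (KeyError).
def Pre_dominant_column_type_py (col_idx : Int) (rows : List (List (List (String × String)))) : Prop :=
  ∀ row ∈ rows, col_idx < PySem.List.len row →
    PySem.Raise.InRange row.length col_idx ∧
    (pvCell col_idx row).contains "value" = true ∧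
    (PySem.Str.strip ((pvCell col_idx row).getD "value" "") ≠ "" →
      (pvCell col_idx row).contains "data_type" = true)
instance (col_idx : Int) (rows : List (List (List (String × String)))) : Decidable (Pre_dominant_column_type_py col_idx rows) := by unfold Pre_dominant_column_type_py; infer_instance

def pvWitness_dominant_column_type_py : Int × (List (List (List (String × String)))) :=
  (0, [[[("value", "3"), ("data_type", "int")]], [[("value", ""), ("data_type", "text")]]])

def Spec_dominant_column_type_py (col_idx : Int) (rows : List (List (List (String × String)))) (out : String) : Prop := out = dominant_column_type_py_alt col_idx rows
instance (col_idx : Int) (rows : List (List (List (String × String)))) (out : String) : Decidable (Spec_dominant_column_type_py col_idx rows out) := by unfold Spec_dominant_column_type_py; infer_instance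

-- ===== CLAIM (what is proved, stated in full; the proofs are below) =====
def Claim_equal_dominant_column_type_py : Prop := ∀ (col_idx : Int) (rows : List (List (List (String × String)))), Dom_dominant_column_type_py col_idx rows → Pre_dominant_column_type_py col_idx rows → Spec_dominant_column_type_py col_idx rows (dominant_column_type_py col_idx rows)

-- ===== LEMMAS AND PROOFS =====

-- the "first maximum, earlier wins ties" right fold over (type, count) pairs:
-- the common normal form of A's sorted-head and B's recursion
def pvMr : List (String × Int) → String × Int
  | [] => ("text", 0)
  | p :: ps => if p.2 ≥ (pvMr ps).2 then p else pvMr ps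

-- A's left scan with strict > equals the right fold pvMr (for nonnegative counts)
def pvScan (ps : List (String × Int)) (b : String × Int) : String × Int :=
  ps.foldl (fun b p => if p.2 > b.2 then p else b) b

theorem pvScan_eq_mr : ∀ (ps : List (String × Int)) (b : String × Int), 0 ≤ b.2 →
    pvScan ps b = if b.2 ≥ (pvMr ps).2 then b else pvMr ps := by
  intro ps
  induction ps with
  | nil =>
    intro b hb
    rw [if_pos (by simpa [pvMr] using hb)]
    rfl
  | cons p ps ih =>
    intro b hb
    by_cases hpb : p.2 > b.2
    · have h1 : pvScan (p :: ps) b = pvScan ps p := by simp [pvScan, List.foldl, hpb]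
      rw [h1, ih p (by omega)]
      by_cases hp : p.2 ≥ (pvMr ps).2
      · have h2 : pvMr (p :: ps) = p := by simp only [pvMr]; rw [if_pos hp]
        rw [h2, if_pos hp, if_neg (by omega)]
      · have h2 : pvMr (p :: ps) = pvMr ps := by simp only [pvMr]; rw [if_neg hp]
        rw [h2, if_neg hp, if_neg (by omega)]
    · have h1 : pvScan (p :: ps) b = pvScan ps b := by simp [pvScan, List.foldl, hpb]
      rw [h1, ih b hb]
      by_cases hp : p.2 ≥ (pvMr ps).2
      · have h2 : pvMr (p :: ps) = p := by simp only [pvMr]; rw [if_pos hp]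
        rw [h2, if_pos (by omega), if_pos (by omega)]
      · have h2 : pvMr (p :: ps) = pvMr ps := by simp only [pvMr]; rw [if_neg hp]
        rw [h2]

theorem pvScan_cons_mr (p : String × Int) (ps : List (String × Int)) (hp : 0 ≤ p.2) :
    pvScan ps p = pvMr (p :: ps) := by
  rw [pvScan_eq_mr ps p hp]; simp only [pvMr]

-- head of the stable descending insertion sort = the strict-first-max scan
theorem pvInsHead :
    ∀ (ps : List (String × Int)) (acc : List (String × Int)) (b : String × Int),
      acc.head? = some b → (∀ y ∈ acc, y.2 ≤ b.2) →
      (ps.foldl (fun a x => PySem.List.insertBy (fun u v => decide (v.2 < u.2)) x a) acc).head?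
          = some (pvScan ps b)
      ∧ ∀ y ∈ ps.foldl (fun a x => PySem.List.insertBy (fun u v => decide (v.2 < u.2)) x a) acc,
          y.2 ≤ (pvScan ps b).2 := by
  intro ps
  induction ps with
  | nil =>
    intro acc b hh hb
    constructor
    · simpa [pvScan] using hh
    · simpa [pvScan] using hb
  | cons x ps ih =>
    intro acc b hh hb
    cases acc with
    | nil => simp at hh
    | cons a tl =>
      have hab : a = b := by simpa using hh
      subst hab
      by_cases hlt : a.2 < x.2
      · have h1 : PySem.List.insertBy (fun u v => decide (v.2 < u.2)) x (a :: tl) = x :: a :: tl := by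
          simp [PySem.List.insertBy, hlt]
        have := ih (x :: a :: tl) x rfl (by
          intro y hy
          simp only [List.mem_cons] at hy
          rcases hy with rfl | rfl | hy
          · exact le_refl _
          · exact le_of_lt hlt
          · exact le_trans (hb y (by simp [hy])) (le_of_lt hlt))
        simpa [List.foldl, h1, pvScan, hlt] using this
      · have h1 : PySem.List.insertBy (fun u v => decide (v.2 < u.2)) x (a :: tl) =
            a :: PySem.List.insertBy (fun u v => decide (v.2 < u.2)) x tl := by
          simp [PySem.List.insertBy, hlt]
        have := ih (a :: PySem.List.insertBy (fun u v => decide (v.2 < u.2)) x tl) a rfl (by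
          intro y hy
          simp only [List.mem_cons] at hy
          rcases hy with rfl | hy
          · exact le_refl _
          · rcases (PySem.List.mem_insertBy _ _ _ _).1 hy with rfl | hy
            · exact le_of_not_gt hlt
            · exact hb y (by simp [hy]))
        simpa [List.foldl, h1, pvScan, hlt] using this

theorem pvHeadSortedRev (p : String × Int) (ps : List (String × Int)) :
    (PySem.List.sorted (p :: ps) (fun q => q.2) true).head? = some (pvScan ps p) := by
  rw [PySem.List.sorted_rev_eq_foldl_insertBy]
  have h := pvInsHead ps [p] p rfl (by intro y hy; simp at hy; simp [hy])
  simpa [List.foldl, PySem.List.insertBy] using h.1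

-- set(first occurrences) of h :: t: h followed by the first occurrences of t without h
theorem pvOfListAddMem : ∀ (t : List String) (acc : PySem.Set String) (h : String),
    h ∈ acc →
    t.foldl PySem.Set.add acc = (t.filter (fun x => !(x == h))).foldl PySem.Set.add acc := by
  intro t
  induction t with
  | nil => intro acc h _; rfl
  | cons x t ih =>
    intro acc h hmem
    by_cases hx : x = h
    · subst hx
      have hadd : PySem.Set.add acc x = acc := by
        simp [PySem.Set.add, PySem.Set.contains, hmem]
      have hflt : ((x :: t).filter (fun y => !(y == x))) = t.filter (fun y => !(y == x)) := by
        simp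
      rw [hflt, List.foldl_cons, hadd]
      exact ih acc x hmem
    · have hflt : ((x :: t).filter (fun y => !(y == h))) = x :: t.filter (fun y => !(y == h)) := by
        simp [hx]
      rw [hflt, List.foldl_cons, List.foldl_cons]
      exact ih (PySem.Set.add acc x) h ((PySem.Set.mem_add acc x h).2 (Or.inl hmem))

theorem pvOfListConsShift : ∀ (t : List String) (acc : PySem.Set String) (h : String),
    (∀ x ∈ t, x ≠ h) → h ∉ acc →
    t.foldl PySem.Set.add (h :: acc) = h :: t.foldl PySem.Set.add acc := by
  intro t
  induction t with
  | nil => intro acc h _ _; rfl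
  | cons x t ih =>
    intro acc h hne hnotin
    have hxh : x ≠ h := hne x (by simp)
    have hcont : PySem.Set.contains (h :: acc) x = PySem.Set.contains acc x := by
      simp only [PySem.Set.contains]
      by_cases hxa : x ∈ acc
      · simp [hxa]
      · simp [hxa, hxh]
    by_cases hc : PySem.Set.contains acc x = true
    · have h1 : PySem.Set.add (h :: acc) x = h :: acc := by
        simp only [PySem.Set.add]; rw [hcont, if_pos hc]
      have h2 : PySem.Set.add acc x = acc := by
        simp only [PySem.Set.add]; rw [if_pos hc]
      simp only [List.foldl, h1, h2]
      exact ih acc h (fun y hy => hne y (by simp [hy])) hnotin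
    · have h1 : PySem.Set.add (h :: acc) x = h :: (acc ++ [x]) := by
        simp only [PySem.Set.add]; rw [hcont, if_neg hc]; rfl
      have h2 : PySem.Set.add acc x = acc ++ [x] := by
        simp only [PySem.Set.add]; rw [if_neg hc]
      simp only [List.foldl, h1, h2]
      refine ih (acc ++ [x]) h (fun y hy => hne y (by simp [hy])) ?_
      intro hmem
      rcases List.mem_append.1 hmem with hmem | hmem
      · exact hnotin hmem
      · exact hxh ((by simpa using hmem : h = x).symm)

theorem pvOfListCons (h : String) (t : List String) :
    PySem.Set.ofList (h :: t) = h :: PySem.Set.ofList (t.filter (fun x => !(x == h))) := by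
  have h0 : PySem.Set.ofList (h :: t) = t.foldl PySem.Set.add [h] := by
    simp [PySem.Set.ofList, List.foldl, PySem.Set.add, PySem.Set.empty, PySem.Set.contains]
  rw [h0, pvOfListAddMem t [h] h (by simp)]
  have := pvOfListConsShift (t.filter (fun x => !(x == h))) [] h
    (by intro x hx; simp at hx; exact hx.2) (by simp)
  simpa [PySem.Set.ofList, PySem.Set.empty] using this

-- B's recursion computes pvMr over Counter's items (first-occurrence order, counts)
theorem pvBMode_eq_mr : ∀ (ts : List String),
    pvBMode ts = pvMr ((PySem.Set.ofList ts).map (fun k => (k, (ts.count k : Int)))) := by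
  intro ts
  induction hn : ts.length using Nat.strong_induction_on generalizing ts with
  | _ n ih =>
    cases ts with
    | nil => simp [pvBMode, PySem.Set.ofList, PySem.Set.empty, pvMr]
    | cons h t =>
      have hfl : (h :: t).filter (fun x => !(x == h)) = t.filter (fun x => !(x == h)) := by
        simp
      have hlen : (t.filter (fun x => !(x == h))).length < n := by
        subst hn
        exact Nat.lt_succ_of_le (List.length_filter_le _ _)
      have ihr := ih _ hlen (t.filter (fun x => !(x == h))) rfl
      have hmap : (PySem.Set.ofList (t.filter (fun x => !(x == h)))).map
            (fun k => (k, ((t.filter (fun x => !(x == h))).count k : Int)))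
          = (PySem.Set.ofList (t.filter (fun x => !(x == h)))).map
            (fun k => (k, ((h :: t).count k : Int))) := by
        apply List.map_congr_left
        intro k hk
        have hk' : k ∈ t.filter (fun x => !(x == h)) := (PySem.Set.mem_ofList _ _).1 hk
        have hkh : ¬ (k == h) = true := by simpa using List.of_mem_filter hk'
        have hcount : List.count k (List.filter (fun x => !(x == h)) t) = List.count k t :=
          List.count_filter (by simpa using hkh)
        have hch : List.count k (h :: t) = List.count k t := by
          rw [List.count_cons]
          simp [show ¬ h = k from fun e => hkh (by simp [e])]
        simp [hcount, hch]
      have hc : (PySem.List.count (h :: t) h : Int) = ((h :: t).count h : Int) := by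
        rw [PySem.List.count_eq]
      rw [pvBMode, hfl, ihr, hmap, pvOfListCons, List.map_cons]
      simp only [pvMr, hc]

-- ===== VERDICT (by name: the statement is the Claim_ definition above) =====
theorem dominant_column_type_py_spec : Claim_equal_dominant_column_type_py := by
  intro col_idx rows _ _
  unfold Spec_dominant_column_type_py dominant_column_type_py dominant_column_type_py_alt
  rw [PySem.List.foldl_append_if]
  set F := (rows.filter (pvQual col_idx)).map (fun row => (pvCell col_idx row).getD "data_type" "") with hF
  simp only [List.nil_append]
  rw [pvBMode_eq_mr]
  by_cases hF0 : F = []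
  · rw [hF0]
    simp [PySem.Set.ofList, PySem.Set.empty, pvMr]
  · rw [if_neg hF0, PySem.Dict.items_counter]
    obtain ⟨x, xs, hFc⟩ := List.exists_cons_of_ne_nil hF0
    rcases hof : PySem.Set.ofList F with _ | ⟨k, ks⟩
    · exfalso
      have hx : x ∈ PySem.Set.ofList F := (PySem.Set.mem_ofList F x).2 (by rw [hFc]; simp)
      simp [hof] at hx
    · simp only [List.map_cons]
      have hhead := pvHeadSortedRev (k, (F.count k : Int))
        (ks.map (fun k => (k, (F.count k : Int))))
      rw [pvScan_cons_mr _ _ (by simp)] at hhead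
      rcases hs : PySem.List.sorted
          ((k, (F.count k : Int)) :: ks.map (fun k => (k, (F.count k : Int))))
          (fun q => q.2) true with _ | ⟨m, ms⟩
      · rw [hs] at hhead; simp at hhead
      · rw [hs] at hhead
        simp only [List.head?_cons, Option.some.injEq] at hhead
        rcases m with ⟨mc, mn⟩
        simp only [List.take]
        exact congrArg Prod.fst hhead
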